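-- pv_equiv track=rewrite | github.com/ifooth/checkio | checkio/OREILLY/ghosts_age.py | opactity
-- ===== SOURCE A (Python) =====
-- def fib(n):
--     if n == 0:
--         return 0
--     elif n == 1:
--         return 1
--     else:
--         return fib(n - 1) + fib(n - 2)
--
-- def opactity(age):
--     if age == 1:
--         return 10000 - 1
--     else:
--         if fib(age):
--             return opactity(age - 1) - age
--         else:
--             return opactity(age - 1) + 1
-- ===== SOURCE B (Python) =====
-- def opactity(age):
--     return 10000 - age * (age + 1) // 2
-- ===== Notes on version B (the rewrite author's own statement) =====
-- stated objective: faster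
-- what changed: Replaced the double recursion (exponential naive fibonacci truthiness test plus linear self-recursion) by the closed form 10000 - age*(age+1)//2, valid since fib is nonzero on all positive arguments; intended as faster — a timing run measured B 264x at the largest size on which A finished at all, and A timed out beyond it, so the speed-up could not be fully confirmed.
-- crash fix: For age <= 0 (infinite recursion on negative fib arguments) and age >= 998 (CPython's default recursion limit) A raises RecursionError; B returns the closed-form value everywhere (10000 at age 0). — e.g. on opactity(0): A raises RecursionError, B returns 10000
import Mathlib
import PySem

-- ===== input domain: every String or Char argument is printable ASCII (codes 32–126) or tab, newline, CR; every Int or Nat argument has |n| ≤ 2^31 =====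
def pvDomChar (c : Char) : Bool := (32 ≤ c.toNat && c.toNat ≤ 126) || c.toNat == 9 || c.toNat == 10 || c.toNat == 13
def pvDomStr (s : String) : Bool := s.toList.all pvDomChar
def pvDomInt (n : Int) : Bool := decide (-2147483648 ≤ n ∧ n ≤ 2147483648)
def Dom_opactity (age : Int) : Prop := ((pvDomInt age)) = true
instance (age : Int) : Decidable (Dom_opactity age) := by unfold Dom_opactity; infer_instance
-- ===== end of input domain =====

-- B replaces A's exponential double recursion by the closed form 10000 - age*(age+1)//2; intended as faster (a timing run measured B 264x at the largest size A finished; A timed out beyond it, so unconfirmed at larger sizes).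

-- ===== PORT A =====
-- fib, transliterated; the `2 ≤ n` guard only makes the recursion total:
-- for n < 0 Python's fib never terminates (those inputs are outside Pre_).
def fibA (n : Int) : Int :=
  if n = 0 then 0
  else if n = 1 then 1
  else if h : 2 ≤ n then fibA (n - 1) + fibA (n - 2) else 0
termination_by n.toNat
decreasing_by all_goals omega

-- opactity, transliterated; the `1 ≤ age` guard only makes the recursion total
-- (Python diverges for age ≤ 0, outside Pre_).
def opactity (age : Int) : Int :=
  if age = 1 then 10000 - 1
  else if h : 1 ≤ age then
    (if fibA age ≠ 0 then opactity (age - 1) - age else opactity (age - 1) + 1)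
  else 0
termination_by age.toNat
decreasing_by all_goals omega

-- ===== PORT B =====
def opactity_alt (age : Int) : Int := 10000 - PySem.Int.floordiv (age * (age + 1)) 2

-- ===== PRECONDITION & SPEC =====
-- A raises RecursionError outside 1 ≤ age ≤ 997: for age ≤ 0 fib recurses forever on negative
-- arguments, and for age ≥ 998 the fib call chain exceeds CPython's default recursion limit.
def Pre_opactity (age : Int) : Prop := 1 ≤ age ∧ age ≤ 997
instance (age : Int) : Decidable (Pre_opactity age) := by unfold Pre_opactity; infer_instance
def pvWitness_opactity : Int := (5)

-- Where A raises RecursionError (age ≤ 0, or age ≥ 998 past the interpreter's recursion limit), B returns the closed-form value (10000 at age 0).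
def Raises_opactity (age : Int) : Prop := age ≤ 0 ∨ 998 ≤ age
instance (age : Int) : Decidable (Raises_opactity age) := by unfold Raises_opactity; infer_instance
def pvRaiseWitness_opactity : Int := (0)
def pvRaiseWitnessOut_opactity : Int := 10000

def Spec_opactity (age : Int) (out : Int) : Prop := out = opactity_alt age
instance (age : Int) (out : Int) : Decidable (Spec_opactity age out) := by unfold Spec_opactity; infer_instance

-- ===== CLAIM (what is proved, stated in full; the proofs are below) =====
def Claim_equal_opactity : Prop := ∀ (age : Int), Dom_opactity age → Pre_opactity age → Spec_opactity age (opactity age)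
def Claim_raises_opactity : Prop := (∀ (age : Int), Dom_opactity age → Raises_opactity age → ¬ Pre_opactity age) ∧ (Dom_opactity (pvRaiseWitness_opactity) ∧ Raises_opactity (pvRaiseWitness_opactity) ∧ opactity_alt (pvRaiseWitness_opactity) = pvRaiseWitnessOut_opactity)

-- ===== LEMMAS AND PROOFS =====
theorem fibA_nonneg (n : Int) : 0 ≤ fibA n := by
  unfold fibA
  split_ifs with h0 h1 h2
  · omega
  · omega
  · have a := fibA_nonneg (n - 1)
    have b := fibA_nonneg (n - 2)
    omega
  · omega
termination_by n.toNat
decreasing_by all_goals omega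

theorem fibA_pos (n : Int) (h : 1 ≤ n) : 1 ≤ fibA n := by
  unfold fibA
  split_ifs with h0 h1 h2
  · omega
  · omega
  · have a := fibA_pos (n - 1) (by omega)
    have b := fibA_nonneg (n - 2)
    omega
  · omega
termination_by n.toNat
decreasing_by all_goals omega

theorem floordiv_tri (m : Int) : PySem.Int.floordiv (m * (m + 1)) 2 * 2 = m * (m + 1) := by
  obtain ⟨k, hk⟩ := Int.even_mul_succ_self m
  have : m * (m + 1) = 2 * k := by omega
  rw [this]
  have h := PySem.Int.floordiv_mul_add_mod (2 * k) 2
  have hm : PySem.Int.mod (2 * k) 2 = 0 := by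
    rw [PySem.Int.mod_eq_emod_of_pos (by omega : (0:Int) < 2)]
    omega
  omega

theorem opactity_closed (age : Int) (h : 1 ≤ age) : opactity age = opactity_alt age := by
  unfold opactity
  split_ifs with h1 hp hf
  · subst h1
    unfold opactity_alt
    have := floordiv_tri (1 : Int)
    omega
  · have ih := opactity_closed (age - 1) (by omega)
    rw [ih]
    unfold opactity_alt
    have t1 := floordiv_tri age
    have t2 := floordiv_tri (age - 1)
    have : (age - 1) * (age - 1 + 1) = age * (age + 1) - 2 * age := by ring
    omega
  · exact absurd (fibA_pos age h) (by omega)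
termination_by age.toNat
decreasing_by all_goals omega

-- ===== VERDICT =====
theorem opactity_spec : Claim_equal_opactity := by
  intro age _ hpre
  exact opactity_closed age hpre.1

@[simp] theorem opactity_raises : Claim_raises_opactity := by
  unfold Claim_raises_opactity
  exact ⟨fun age _ hr => by unfold Raises_opactity at hr; unfold Pre_opactity; omega, by decide⟩
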